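-- pv_equiv track=rewrite | github.com/rsprenkels/kattis | python/1_9/glitchbot.py | glitchbot
-- ===== SOURCE A (Python) =====
-- import copy
-- from typing import Sequence, Tuple
--
-- def final_location(instructions: Sequence[str]):
--     x, y = 0, 0
--     dir_x, dir_y = 0, 1
--     for inst in instructions:
--         if inst == 'Forward':
--             x += dir_x
--             y += dir_y
--         elif inst == 'Right':
--             dir_x, dir_y = dir_y, -dir_x
--         else:
--             dir_x, dir_y = -dir_y, dir_x
--     return (x, y)
--
-- def glitchbot(x: int, y: int, instructions: Sequence[str]) -> Tuple[int, str]: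
--     for ndx, instruction in enumerate(instructions):
--         for alt_inst in [a for a in ['Forward', 'Left', 'Right'] if a != instruction]:
--             new_set = copy.deepcopy(instructions)
--             new_set[ndx] = alt_inst
--             if final_location(new_set) == (x, y):
--                 return (ndx + 1, alt_inst)
--     return (99, 'error')
-- ===== SOURCE B (Python) =====
-- def glitchbot(x, y, instructions):
--     # O(n): suffix linear maps computed back-to-front, then one forward pass
--     # trying each alternative in O(1).
--     n = len(instructions)
--     # after position j, starting at pos p with direction d, the final position
--     # is p + d.x*u[j] + d.y*v[j]  (u[j], v[j] integer vectors)
--     u = [(0, 0)] * (n + 1)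
--     v = [(0, 0)] * (n + 1)
--     for j in range(n - 1, -1, -1):
--         inst = instructions[j]
--         uu, vv = u[j + 1], v[j + 1]
--         if inst == 'Forward':
--             u[j] = (uu[0] + 1, uu[1])
--             v[j] = (vv[0], vv[1] + 1)
--         elif inst == 'Right':
--             u[j] = (-vv[0], -vv[1])
--             v[j] = uu
--         else:
--             u[j] = vv
--             v[j] = (-uu[0], -uu[1])
--     px, py, dx, dy = 0, 0, 0, 1
--     for i, inst in enumerate(instructions):
--         uu, vv = u[i + 1], v[i + 1]
--         for alt in ('Forward', 'Left', 'Right'):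
--             if alt == inst:
--                 continue
--             if alt == 'Forward':
--                 qx, qy, ex, ey = px + dx, py + dy, dx, dy
--             elif alt == 'Right':
--                 qx, qy, ex, ey = px, py, dy, -dx
--             else:
--                 qx, qy, ex, ey = px, py, -dy, dx
--             if qx + ex * uu[0] + ey * vv[0] == x and qy + ex * uu[1] + ey * vv[1] == y:
--                 return (i + 1, alt)
--         if inst == 'Forward':
--             px, py = px + dx, py + dy
--         elif inst == 'Right':
--             dx, dy = dy, -dx
--         else:
--             dx, dy = -dy, dx
--     return (99, 'error')
-- ===== Notes on version B (the rewrite author's own statement) =====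
-- stated objective: faster
-- what changed: Replaces A's try-every-single-edit re-simulation (rerunning the whole walk for each of the 2n alternatives) by precomputed suffix linear maps plus one forward pass, testing each alternative in O(1).
import Mathlib
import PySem

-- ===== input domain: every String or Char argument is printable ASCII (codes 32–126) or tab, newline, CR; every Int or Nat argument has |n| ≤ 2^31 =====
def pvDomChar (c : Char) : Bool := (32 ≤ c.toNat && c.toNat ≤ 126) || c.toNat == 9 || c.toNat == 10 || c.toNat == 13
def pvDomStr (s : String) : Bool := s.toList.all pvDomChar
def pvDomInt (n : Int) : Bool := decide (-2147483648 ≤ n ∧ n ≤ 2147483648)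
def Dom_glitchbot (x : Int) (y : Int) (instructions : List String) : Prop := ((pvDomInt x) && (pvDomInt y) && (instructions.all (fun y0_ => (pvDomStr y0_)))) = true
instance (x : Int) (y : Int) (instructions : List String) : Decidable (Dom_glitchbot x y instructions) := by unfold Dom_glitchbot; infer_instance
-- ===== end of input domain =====

-- B replaces A's try-every-edit re-simulation by suffix linear maps plus one forward pass, testing each alternative in O(1) (objective: fewer passes over the list).

-- ===== PORT A =====
-- state = ((x, y), (dir_x, dir_y))
def fl_step (s : (Int × Int) × (Int × Int)) (inst : String) : (Int × Int) × (Int × Int) :=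
  if inst = "Forward" then ((s.1.1 + s.2.1, s.1.2 + s.2.2), s.2)
  else if inst = "Right" then (s.1, (s.2.2, -s.2.1))
  else (s.1, (-s.2.2, s.2.1))

def final_location (instructions : List String) : Int × Int :=
  (instructions.foldl fl_step ((0, 0), (0, 1))).1

-- inner loop: for alt_inst in [a for a in ['Forward','Left','Right'] if a != instruction]
def tryA (x y : Int) (L : List String) (ndx : Nat) : List String → Option (Int × String)
  | [] => none
  | a :: as =>
    if final_location (L.set ndx a) = (x, y) then some ((ndx : Int) + 1, a)
    else tryA x y L ndx as

-- outer loop: for ndx, instruction in enumerate(instructions)  (enumerate = index counter)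
def goA (x y : Int) (L : List String) : Nat → List String → Int × String
  | _, [] => (99, "error")
  | ndx, inst :: rest =>
    match tryA x y L ndx (["Forward", "Left", "Right"].filter (fun a => a ≠ inst)) with
    | some r => r
    | none => goA x y L (ndx + 1) rest

def glitchbot (x : Int) (y : Int) (instructions : List String) : Int × String :=
  goA x y instructions 0 instructions

-- ===== PORT B =====
-- suffix maps built back-to-front; head = map for the whole list:
-- final pos from (p, d) after the list = p + d.1 * u + d.2 * v, entry = (u, v)
def suffixMaps : List String → List ((Int × Int) × (Int × Int))
  | [] => [((0, 0), (0, 0))]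
  | inst :: t =>
    let ms := suffixMaps t
    let m := ms.headI
    (if inst = "Forward" then ((m.1.1 + 1, m.1.2), (m.2.1, m.2.2 + 1))
     else if inst = "Right" then ((-m.2.1, -m.2.2), m.1)
     else (m.2, (-m.1.1, -m.1.2))) :: ms

-- applying one instruction to (pos, dir) in B's forward pass
def bApply (p d : Int × Int) (a : String) : (Int × Int) × (Int × Int) :=
  if a = "Forward" then ((p.1 + d.1, p.2 + d.2), d)
  else if a = "Right" then (p, (d.2, -d.1))
  else (p, (-d.2, d.1))

-- inner loop of B: alternatives in order, skipping the current instruction, O(1) test each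
def tryB (x y : Int) (p d uu vv : Int × Int) (inst : String) (i : Nat) :
    List String → Option (Int × String)
  | [] => none
  | a :: as =>
    if a = inst then tryB x y p d uu vv inst i as
    else
      let s := bApply p d a
      if s.1.1 + s.2.1 * uu.1 + s.2.2 * vv.1 = x ∧ s.1.2 + s.2.1 * uu.2 + s.2.2 * vv.2 = y then
        some ((i : Int) + 1, a)
      else tryB x y p d uu vv inst i as

-- forward pass: ms = suffixMaps of the remaining list
def goB (x y : Int) : List String → List ((Int × Int) × (Int × Int)) → Nat →
    (Int × Int) → (Int × Int) → Int × String
  | [], _, _, _, _ => (99, "error")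
  | inst :: rest, ms, i, p, d =>
    let m := ms.tail.headI
    match tryB x y p d m.1 m.2 inst i ["Forward", "Left", "Right"] with
    | some r => r
    | none =>
      let s := bApply p d inst
      goB x y rest ms.tail (i + 1) s.1 s.2

def glitchbot_alt (x : Int) (y : Int) (instructions : List String) : Int × String :=
  goB x y instructions (suffixMaps instructions) 0 (0, 0) (0, 1)

-- ===== PRECONDITION & SPEC =====
def Spec_glitchbot (x : Int) (y : Int) (instructions : List String) (out : Int × String) : Prop := out = glitchbot_alt x y instructions
instance (x : Int) (y : Int) (instructions : List String) (out : Int × String) : Decidable (Spec_glitchbot x y instructions out) := by unfold Spec_glitchbot; infer_instance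

-- ===== CLAIM (what is proved, stated in full; the proofs are below) =====
def Claim_equal_glitchbot : Prop := ∀ (x : Int) (y : Int) (instructions : List String), Dom_glitchbot x y instructions → Spec_glitchbot x y instructions (glitchbot x y instructions)

-- ===== LEMMAS AND PROOFS =====

-- suffix-map correctness: head of suffixMaps describes the fold over the list
theorem suffix_spec (l : List String) : ∀ (s : (Int × Int) × (Int × Int)),
    (l.foldl fl_step s).1 =
      (s.1.1 + s.2.1 * (suffixMaps l).headI.1.1 + s.2.2 * (suffixMaps l).headI.2.1,
       s.1.2 + s.2.1 * (suffixMaps l).headI.1.2 + s.2.2 * (suffixMaps l).headI.2.2) := by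
  induction l with
  | nil => intro s; simp [suffixMaps]
  | cons inst t ih =>
    intro s
    simp only [List.foldl_cons, suffixMaps]
    rw [ih]
    simp only [fl_step, List.headI_cons]
    split_ifs <;> (simp only [Prod.mk.injEq]; constructor <;> ring)

theorem bApply_eq (p d : Int × Int) (a : String) : bApply p d a = fl_step (p, d) a := rfl

theorem set_append_length {α : Type} (pre : List α) (b : α) (rest : List α) (a : α) :
    (pre ++ b :: rest).set pre.length a = pre ++ a :: rest := by
  induction pre with
  | nil => rfl
  | cons h t ih => simp [ih]

-- the O(1) test of B equals A's full re-simulation test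
theorem check_eq (x y : Int) (pre rest : List String) (a : String) (p d : Int × Int)
    (h : pre.foldl fl_step ((0, 0), (0, 1)) = (p, d)) :
    (final_location (pre ++ a :: rest) = (x, y)) ↔
      ((bApply p d a).1.1 + (bApply p d a).2.1 * (suffixMaps rest).headI.1.1
          + (bApply p d a).2.2 * (suffixMaps rest).headI.2.1 = x ∧
       (bApply p d a).1.2 + (bApply p d a).2.1 * (suffixMaps rest).headI.1.2
          + (bApply p d a).2.2 * (suffixMaps rest).headI.2.2 = y) := by
  unfold final_location
  rw [List.foldl_append, h, List.foldl_cons, ← bApply_eq, suffix_spec rest (bApply p d a)]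
  constructor
  · intro he
    exact ⟨congrArg Prod.fst he, congrArg Prod.snd he⟩
  · rintro ⟨h1, h2⟩
    simp [Prod.ext_iff]
    exact ⟨h1, h2⟩

-- inner loops agree: A over the filtered alternatives, B skipping inline
theorem try_eq (x y : Int) (pre rest : List String) (inst : String) (p d : Int × Int)
    (h : pre.foldl fl_step ((0, 0), (0, 1)) = (p, d)) (alts : List String) :
    tryA x y (pre ++ inst :: rest) pre.length (alts.filter (fun a => a ≠ inst)) =
      tryB x y p d (suffixMaps rest).headI.1 (suffixMaps rest).headI.2 inst pre.length alts := by
  induction alts with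
  | nil => rfl
  | cons a as ih =>
    by_cases ha : a = inst
    · subst ha
      simp only [List.filter_cons, ne_eq, not_true_eq_false, decide_false,
        Bool.false_eq_true, if_false, tryB]
      exact ih
    · simp only [List.filter_cons, ne_eq, ha, not_false_eq_true, decide_true, if_true,
        tryA, tryB]
      rw [set_append_length]
      by_cases hc : final_location (pre ++ a :: rest) = (x, y)
      · rw [if_pos hc, if_pos ((check_eq x y pre rest a p d h).mp hc)]; simp
      · rw [if_neg hc, if_neg (fun hh => hc ((check_eq x y pre rest a p d h).mpr hh)), ih]; simp

theorem main_eq (x y : Int) : ∀ (rest pre : List String) (p d : Int × Int),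
    pre.foldl fl_step ((0, 0), (0, 1)) = (p, d) →
    goA x y (pre ++ rest) pre.length rest = goB x y rest (suffixMaps rest) pre.length p d := by
  intro rest
  induction rest with
  | nil => intro pre p d _; rfl
  | cons inst rest' ih =>
    intro pre p d h
    show (match tryA x y (pre ++ inst :: rest') pre.length
            (["Forward", "Left", "Right"].filter (fun a => a ≠ inst)) with
      | some r => r
      | none => goA x y (pre ++ inst :: rest') (pre.length + 1) rest') = _
    have htail : (suffixMaps (inst :: rest')).tail = suffixMaps rest' := rfl
    show _ = (match tryB x y p d (suffixMaps (inst :: rest')).tail.headI.1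
          (suffixMaps (inst :: rest')).tail.headI.2 inst pre.length ["Forward", "Left", "Right"] with
      | some r => r
      | none => goB x y rest' (suffixMaps (inst :: rest')).tail (pre.length + 1)
          (bApply p d inst).1 (bApply p d inst).2)
    rw [htail, ← try_eq x y pre rest' inst p d h]
    cases tryA x y (pre ++ inst :: rest') pre.length
        (["Forward", "Left", "Right"].filter (fun a => a ≠ inst)) with
    | some r => rfl
    | none =>
      simp only []
      have hlen : pre.length + 1 = (pre ++ [inst]).length := by simp
      have happ : pre ++ inst :: rest' = (pre ++ [inst]) ++ rest' := by simp
      rw [happ, hlen, ih (pre ++ [inst]) (bApply p d inst).1 (bApply p d inst).2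
        (by rw [List.foldl_append, h, List.foldl_cons, List.foldl_nil, ← bApply_eq])]

-- ===== VERDICT (by name: the statement is the Claim_ definition above) =====
theorem glitchbot_spec : Claim_equal_glitchbot := by
  intro x y instructions _
  unfold Spec_glitchbot glitchbot glitchbot_alt
  have := main_eq x y instructions [] (0, 0) (0, 1) rfl
  simpa using this
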